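-- pv_equiv track=rewrite | github.com/adamuk01/wmccl-cx-scripts | apply_prev_year_stats.py | normalise_name
-- ===== SOURCE A (Python) =====
-- def normalise_name(name: str) -> str:
--     """
--     Normalise a person's name:
--       - strip spaces
--       - capitalise each word
--       - handle simple hyphenated names (SMITH-JONES -> Smith-Jones)
--     """
--     if not name:
--         return ""
--     name = name.strip()
--     words = name.split()
--     fixed = []
--     for w in words:
--         parts = w.split("-")
--         parts = [p.capitalize() if p else p for p in parts]
--         fixed.append("-".join(parts))
--     return " ".join(fixed)
-- ===== SOURCE B (Python) =====
-- def normalise_name(name: str) -> str: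
--     # One pass: collapse whitespace, then a small state machine that
--     # uppercases the first character of each word segment and lowercases the rest.
--     collapsed = ' '.join(name.split())
--     out = []
--     start_of_word = True
--     for ch in collapsed:
--         if ch == ' ' or ch == '-':
--             out.append(ch)
--             start_of_word = True
--         elif start_of_word:
--             out.append(ch.upper())
--             start_of_word = False
--         else:
--             out.append(ch.lower())
--     return ''.join(out)
-- ===== Notes on version B (the rewrite author's own statement) =====
-- stated objective: alternative
-- what changed: Replaced A's nested tokenize-by-space then split-by-hyphen/capitalize/join loops with a single whitespace-collapsing join followed by one character-level state-machine pass that uppercases the first character after each space/hyphen and lowercases the rest.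
import Mathlib
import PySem

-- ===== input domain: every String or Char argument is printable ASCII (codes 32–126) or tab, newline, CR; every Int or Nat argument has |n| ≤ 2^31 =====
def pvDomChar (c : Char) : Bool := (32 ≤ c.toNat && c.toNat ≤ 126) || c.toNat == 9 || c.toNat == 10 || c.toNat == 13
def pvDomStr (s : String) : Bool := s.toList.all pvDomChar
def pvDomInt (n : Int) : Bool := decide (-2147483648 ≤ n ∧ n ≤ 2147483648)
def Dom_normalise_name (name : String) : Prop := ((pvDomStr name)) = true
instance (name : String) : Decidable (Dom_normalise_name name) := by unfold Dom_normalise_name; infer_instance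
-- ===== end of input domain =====

-- B replaces A's nested split/capitalize/join loops with one state-machine pass over the
-- whitespace-collapsed string; same cost, different structure (objective: alternative).

-- ===== PORT A =====
-- hand port of str.capitalize (exact on the ASCII domain): upper first char, lower the rest
def pyCapitalize (p : List Char) : List Char :=
  match p with
  | [] => []
  | c :: r => PySem.Chars.upperChar c :: PySem.Chars.lower r

def normalise_name (name : String) : String :=
  if name = "" then ""
  else
    let stripped := PySem.Str.strip name
    let words := PySem.Str.split₀ stripped
    let fixed := words.foldl (fun acc w =>
      let parts := PySem.Chars.splitOn w.toList ['-']
      let parts := parts.map (fun p => if p = [] then p else pyCapitalize p)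
      acc ++ [String.ofList (PySem.Chars.join ['-'] parts)]) ([] : List String)
    PySem.Str.join " " fixed

-- ===== PORT B =====
-- the state-machine loop of Source B: start_of_word flag, one character at a time
def altGo : List Char → Bool → List Char
  | [], _ => []
  | c :: rest, start =>
    if c = ' ' ∨ c = '-' then c :: altGo rest true
    else if start then PySem.Chars.upperChar c :: altGo rest false
    else PySem.Chars.lowerChar c :: altGo rest false

def normalise_name_alt (name : String) : String :=
  let collapsed := PySem.Str.join " " (PySem.Str.split₀ name)
  String.ofList (altGo collapsed.toList true)

-- ===== PRECONDITION & SPEC =====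
def Spec_normalise_name (name : String) (out : String) : Prop := out = normalise_name_alt name
instance (name : String) (out : String) : Decidable (Spec_normalise_name name out) := by unfold Spec_normalise_name; infer_instance

-- ===== CLAIM (what is proved, stated in full; the proofs are below) =====
def Claim_equal_normalise_name : Prop := ∀ (name : String), Dom_normalise_name name → Spec_normalise_name name (normalise_name name)

-- ===== LEMMAS AND PROOFS =====

-- accumulator-free version of PySem.Chars.split₀.go
def w₀ : List Char → List Char → List (List Char)
  | cur, [] => if cur.isEmpty then [] else [cur.reverse]
  | cur, c :: rest =>
    if PySem.Chars.isspace c then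
      (if cur.isEmpty then w₀ [] rest else cur.reverse :: w₀ [] rest)
    else w₀ (c :: cur) rest

theorem split₀_go_eq (l : List Char) : ∀ (cur : List Char) (acc : List (List Char)),
    PySem.Chars.split₀.go l cur acc = acc.reverse ++ w₀ cur l := by
  induction l with
  | nil => intro cur acc; simp [PySem.Chars.split₀.go, w₀]; split_ifs <;> simp_all
  | cons c rest ih =>
    intro cur acc
    simp only [PySem.Chars.split₀.go, w₀]
    split_ifs with h1 h2 <;> simp_all [List.isEmpty_iff]

theorem split₀_eq_w₀ (l : List Char) : PySem.Chars.split₀ l = w₀ [] l := by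
  simp [PySem.Chars.split₀, split₀_go_eq]

theorem w₀_dropWhile (l : List Char) :
    w₀ [] (List.dropWhile PySem.Chars.isspace l) = w₀ [] l := by
  induction l with
  | nil => rfl
  | cons c rest ih =>
    by_cases h : PySem.Chars.isspace c
    · simp [List.dropWhile, h, w₀, ih]
    · simp [List.dropWhile, h]

theorem w₀_allspace (t : List Char) (ht : ∀ c ∈ t, PySem.Chars.isspace c = true) :
    ∀ cur, w₀ cur t = if cur.isEmpty then [] else [cur.reverse] := by
  induction t with
  | nil => intro cur; rfl
  | cons c rest ih =>
    intro cur
    have hc := ht c (by simp)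
    have hr : ∀ x ∈ rest, PySem.Chars.isspace x = true := fun x hx => ht x (by simp [hx])
    have := ih hr []
    simp only [w₀, hc] at this ⊢
    split_ifs with h <;> simp_all

theorem w₀_append_space (t : List Char) (ht : ∀ c ∈ t, PySem.Chars.isspace c = true) :
    ∀ (l cur : List Char), w₀ cur (l ++ t) = w₀ cur l := by
  intro l
  induction l with
  | nil => intro cur; simpa [w₀] using w₀_allspace t ht cur
  | cons c rest ih =>
    intro cur
    simp only [List.cons_append, w₀]
    split_ifs <;> simp [ih]

theorem w₀_strip (l : List Char) : w₀ [] (PySem.Chars.strip l) = w₀ [] l := by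
  have hdec : PySem.Chars.lstrip l
      = PySem.Chars.rstrip (PySem.Chars.lstrip l)
        ++ (List.takeWhile PySem.Chars.isspace (PySem.Chars.lstrip l).reverse).reverse := by
    simp only [PySem.Chars.rstrip]
    rw [← List.reverse_append, List.takeWhile_append_dropWhile, List.reverse_reverse]
  have ht : ∀ c ∈ (List.takeWhile PySem.Chars.isspace (PySem.Chars.lstrip l).reverse).reverse,
      PySem.Chars.isspace c = true :=
    fun c hc => List.mem_takeWhile_imp (List.mem_reverse.mp hc)
  calc w₀ [] (PySem.Chars.strip l)
      = w₀ [] (PySem.Chars.rstrip (PySem.Chars.lstrip l)) := rfl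
    _ = w₀ [] (PySem.Chars.rstrip (PySem.Chars.lstrip l)
          ++ (List.takeWhile PySem.Chars.isspace (PySem.Chars.lstrip l).reverse).reverse) :=
        (w₀_append_space _ ht _ _).symm
    _ = w₀ [] (PySem.Chars.lstrip l) := by rw [← hdec]
    _ = w₀ [] l := w₀_dropWhile l

-- per-hyphen split characterisation of PySem.Chars.splitOn _ ['-']
def dSplit : List Char → List Char × List (List Char)
  | [] => ([], [])
  | c :: r =>
    let pr := dSplit r
    if c = '-' then ([], pr.1 :: pr.2) else (c :: pr.1, pr.2)

theorem splitOn_go_eq (l : List Char) : ∀ (fuel : Nat) (cur : List Char) (acc : List (List Char)),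
    l.length ≤ fuel →
    PySem.Chars.splitOn.go ['-'] fuel l cur acc
      = acc.reverse ++ (cur.reverse ++ (dSplit l).1) :: (dSplit l).2 := by
  induction l with
  | nil =>
    intro fuel cur acc _
    cases fuel <;> simp [PySem.Chars.splitOn.go, dSplit]
  | cons c rest ih =>
    intro fuel cur acc hf
    cases fuel with
    | zero => simp at hf
    | succ n =>
      simp only [PySem.Chars.splitOn.go]
      by_cases hc : c = '-'
      · subst hc
        rw [if_pos (by simp [List.isPrefixOf])]
        rw [show List.drop (['-'] : List Char).length ('-' :: rest) = rest from rfl]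
        rw [ih n [] (cur.reverse :: acc) (by simpa using Nat.le_of_succ_le_succ hf)]
        simp [dSplit]
      · rw [if_neg (by simp [List.isPrefixOf]; exact fun h => hc h.symm)]
        rw [ih n (c :: cur) acc (by simpa using Nat.le_of_succ_le_succ hf)]
        simp [dSplit, hc]

theorem splitOn_dash (w : List Char) :
    PySem.Chars.splitOn w ['-'] = (dSplit w).1 :: (dSplit w).2 := by
  simpa using splitOn_go_eq w (w.length + 1) [] [] (by omega)


def capIf (q : List Char) : List Char := if q = [] then q else pyCapitalize q

def tTail (ps : List (List Char)) : List Char := ps.flatMap (fun q => '-' :: capIf q)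

theorem foldl_append_map {α β : Type} (f : α → β) (l : List α) :
    ∀ acc : List β, l.foldl (fun acc w => acc ++ [f w]) acc = acc ++ l.map f := by
  induction l with
  | nil => simp
  | cons x xs ih => intro acc; simp [List.foldl, ih]

theorem w₀_nospace (l : List Char) : ∀ cur, (∀ c ∈ cur, PySem.Chars.isspace c = false) →
    ∀ w ∈ w₀ cur l, ∀ c ∈ w, PySem.Chars.isspace c = false := by
  induction l with
  | nil =>
    intro cur hcur w hw c hc
    simp only [w₀] at hw
    split_ifs at hw
    · simp at hw
    · simp only [List.mem_singleton] at hw; subst hw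
      exact hcur c (List.mem_reverse.mp hc)
  | cons x rest ih =>
    intro cur hcur w hw c hc
    simp only [w₀] at hw
    split_ifs at hw with h1 h2
    · exact ih [] (by simp) w hw c hc
    · rcases List.mem_cons.mp hw with rfl | hw
      · exact hcur c (by simpa using hc)
      · exact ih [] (by simp) w hw c hc
    · refine ih (x :: cur) ?_ w hw c hc
      intro d hd
      rcases List.mem_cons.mp hd with rfl | hd
      · simpa using h1
      · exact hcur d hd

theorem altGo_word (w : List Char) (hw : ∀ c ∈ w, PySem.Chars.isspace c = false) :
    altGo w true = capIf (dSplit w).1 ++ tTail (dSplit w).2 ∧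
    altGo w false = PySem.Chars.lower (dSplit w).1 ++ tTail (dSplit w).2 := by
  induction w with
  | nil => simp [altGo, dSplit, capIf, tTail, PySem.Chars.lower]
  | cons c rest ih =>
    have hrest : ∀ d ∈ rest, PySem.Chars.isspace d = false := fun d hd => hw d (by simp [hd])
    have ihr := ih hrest
    have hcs : c ≠ ' ' := by
      intro h; subst h; have := hw ' ' (by simp); simp [PySem.Chars.isspace] at this
    by_cases hcd : c = '-'
    · subst hcd
      simp only [altGo, dSplit]
      constructor <;> simp [capIf, tTail, PySem.Chars.lower, ihr.1]
    · have hcond : ¬(c = ' ' ∨ c = '-') := by tauto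
      simp only [altGo, dSplit, if_neg hcond]
      constructor
      · simp [capIf, hcd, pyCapitalize, ihr.2, PySem.Chars.lower]
      · simp [hcd, PySem.Chars.lower, ihr.2]

theorem join_dash_cons (x : List Char) (xs : List (List Char)) :
    PySem.Chars.join ['-'] (x :: xs) = x ++ xs.flatMap (fun q => '-' :: q) := by
  induction xs generalizing x with
  | nil => simp [PySem.Chars.join, List.intercalate]
  | cons y ys ih =>
    simp only [PySem.Chars.join, List.intercalate, List.intersperse] at ih ⊢
    simp_all

theorem join_dash_capIf (p : List Char) (ps : List (List Char)) :
    PySem.Chars.join ['-'] ((p :: ps).map capIf) = capIf p ++ tTail ps := by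
  rw [List.map_cons, join_dash_cons, tTail, List.flatMap_map]

theorem altGo_append (xs ys : List Char) : ∀ st,
    altGo (xs ++ ' ' :: ys) st = altGo xs st ++ ' ' :: altGo ys true := by
  induction xs with
  | nil => intro st; simp [altGo]
  | cons c rest ih =>
    intro st
    simp only [List.cons_append, altGo]
    split_ifs <;> simp [ih]

theorem altGo_join (ws : List (List Char)) :
    altGo (PySem.Chars.join [' '] ws) true
      = PySem.Chars.join [' '] (ws.map (fun w => altGo w true)) := by
  induction ws with
  | nil => simp [PySem.Chars.join, List.intercalate, altGo]
  | cons w ws ih =>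
    cases ws with
    | nil => simp [PySem.Chars.join, List.intercalate]
    | cons w' rest =>
      have hj : ∀ (x : List Char) (y : List Char) (zs : List (List Char)),
          PySem.Chars.join [' '] (x :: y :: zs) = x ++ ' ' :: PySem.Chars.join [' '] (y :: zs) := by
        intro x y zs
        simp [PySem.Chars.join, List.intercalate, List.intersperse]
      rw [hj, altGo_append, ih]
      simp only [List.map_cons]
      rw [hj]

theorem words_eq (name : String) :
    List.map String.toList (PySem.Str.split₀ (PySem.Str.strip name)) = w₀ [] name.toList := by
  rw [PySem.Str.split₀_map_toList, PySem.Str.toList_strip, split₀_eq_w₀, w₀_strip]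

-- ===== VERDICT (by name: the statement is the Claim_ definition above) =====
theorem main_chars (l : List Char) :
    PySem.Chars.join [' ']
        ((w₀ [] l).map (fun cl =>
          PySem.Chars.join ['-'] ((PySem.Chars.splitOn cl ['-']).map capIf)))
      = altGo (PySem.Chars.join [' '] (w₀ [] l)) true := by
  rw [altGo_join]
  apply congrArg
  apply List.map_congr_left
  intro w hw
  have hns : ∀ c ∈ w, PySem.Chars.isspace c = false := w₀_nospace l [] (by simp) w hw
  rw [splitOn_dash, join_dash_capIf, ← (altGo_word w hns).1]

theorem normalise_name_spec : Claim_equal_normalise_name := by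
  intro name _
  unfold Spec_normalise_name
  by_cases h : name = ""
  · subst h; rfl
  · apply String.toList_inj.mp
    unfold normalise_name normalise_name_alt
    rw [if_neg h]
    simp only [foldl_append_map, List.nil_append, PySem.Str.toList_join, List.map_map,
      Function.comp_def, String.toList_ofList]
    rw [show (fun w : String =>
          PySem.Chars.join ['-']
            ((PySem.Chars.splitOn w.toList ['-']).map
              (fun p => if p = [] then p else pyCapitalize p)))
        = (fun cl => PySem.Chars.join ['-'] ((PySem.Chars.splitOn cl ['-']).map capIf))
            ∘ String.toList from rfl]
    rw [← List.map_map]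
    rw [words_eq, PySem.Str.split₀_map_toList, split₀_eq_w₀]
    rw [show (" " : String).toList = [' '] from rfl]
    exact main_chars name.toList
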